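-- pv_equiv track=rewrite | github.com/honey-lee/test | Best Album.py | solution
-- ===== SOURCE A (Python) =====
-- def solution(genres, plays):
--     answer = []
--     genre_times = {}
--
--     for i in range(len(genres)):
--         if genres[i] not in genre_times:
--             genre_times[genres[i]] = plays[i]
--         else:
--             genre_times[genres[i]] += plays[i]
--
--     genre_times = sorted(genre_times.items(), key=lambda x: x[1], reverse=True)
--
--     for i in range(len(genre_times)):
--         if genres.count(genre_times[i][0]) == 1:
--             answer.append(genres.index(genre_times[i][0]))
--
--
--
--     return answer
-- ===== SOURCE B (Python) =====
-- def solution(genres, plays):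
--     # Sort the genre names; in the sorted list equal names are adjacent, so a
--     # genre occurs exactly once iff some position differs from both neighbours.
--     sg = sorted(genres)
--     n = len(sg)
--     singles = {sg[i] for i in range(n)
--                if (i == 0 or sg[i - 1] != sg[i]) and (i == n - 1 or sg[i + 1] != sg[i])}
--     pairs = [(p, i) for i, (g, p) in enumerate(zip(genres, plays)) if g in singles]
--     pairs.sort(key=lambda pi: pi[0], reverse=True)
--     return [i for p, i in pairs]
-- ===== Notes on version B (the rewrite author's own statement) =====
-- stated objective: faster
-- what changed: B has no dict at all: it sorts the genre names and detects single-occurrence genres as sorted positions differing from both neighbours, then filters (play, index) pairs to those genres in one pass over enumerate(zip(...)) and stably sorts only that short list by play descending, whereas A aggregates totals in a dict, sorts ALL genre totals and filters during the output loop with repeated genres.count/genres.index rescans.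
import Mathlib
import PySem

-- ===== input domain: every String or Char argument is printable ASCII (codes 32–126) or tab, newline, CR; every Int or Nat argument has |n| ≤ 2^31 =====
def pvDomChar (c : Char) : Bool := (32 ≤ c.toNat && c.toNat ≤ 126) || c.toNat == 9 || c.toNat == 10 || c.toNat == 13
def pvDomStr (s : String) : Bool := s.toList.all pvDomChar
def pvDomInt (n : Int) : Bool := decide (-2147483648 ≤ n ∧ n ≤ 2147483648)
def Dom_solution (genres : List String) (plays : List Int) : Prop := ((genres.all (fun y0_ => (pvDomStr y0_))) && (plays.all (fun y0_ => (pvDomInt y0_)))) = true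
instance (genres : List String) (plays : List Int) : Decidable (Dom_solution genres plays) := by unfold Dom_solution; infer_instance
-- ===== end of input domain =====

-- B uses no dict: it sorts the genre names, reads off the genres occurring exactly once as the sorted
-- positions that differ from both neighbours, filters the (play, index) pairs to those genres in one
-- pass and stably sorts only that short list by play descending; A aggregates totals in a dict, sorts
-- ALL genre totals and filters during the output loop with repeated genres.count/genres.index rescans.
-- Objective: faster.

-- ===== PORT A =====
def solution (genres : List String) (plays : List Int) : List Int :=
  let genreTimes : PySem.Dict String Int :=
    (PySem.List.pyRange 0 (PySem.List.len genres) 1).foldl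
      (fun d i =>
        let g := PySem.List.pyGetD genres i ""
        if !d.contains g then d.insert g (PySem.List.pyGetD plays i 0)
        else d.insert g (d.getD g 0 + PySem.List.pyGetD plays i 0))
      PySem.Dict.empty
  let sortedItems := PySem.List.sorted genreTimes.items (fun x => x.2) true
  sortedItems.foldl
    (fun answer it =>
      if PySem.List.count genres it.1 = 1 then
        answer ++ [(((PySem.List.index? genres it.1).getD 0 : Nat) : Int)]
      else answer)
    []

-- ===== PORT B =====
def solution_alt (genres : List String) (plays : List Int) : List Int :=
  let sg := PySem.List.sorted genres (fun g => g) false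
  let n := PySem.List.len sg
  let singles : PySem.Set String :=
    (PySem.List.pyRange 0 n 1).foldl
      (fun s i =>
        if ((i == 0) || !(PySem.List.pyGetD sg (i - 1) "" == PySem.List.pyGetD sg i "")) &&
           ((i == n - 1) || !(PySem.List.pyGetD sg (i + 1) "" == PySem.List.pyGetD sg i "")) then
          PySem.Set.add s (PySem.List.pyGetD sg i "")
        else s)
      PySem.Set.empty
  let pairs := ((PySem.List.enumerate (genres.zip plays) 0).filter
      (fun e => singles.contains e.2.1)).map (fun e => (e.2.2, e.1))
  (PySem.List.sorted pairs (fun pi => pi.1) true).map (fun pi => pi.2)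

-- ===== PRECONDITION & SPEC =====
-- Pre_ excludes exactly the inputs where A raises IndexError (plays shorter than genres).
def Pre_solution (genres : List String) (plays : List Int) : Prop := genres.length ≤ plays.length
instance (genres : List String) (plays : List Int) : Decidable (Pre_solution genres plays) := by unfold Pre_solution; infer_instance
def pvWitness_solution : List String × List Int := (["a", "b", "a"], [1, 2, 3])

def Spec_solution (genres : List String) (plays : List Int) (out : List Int) : Prop := out = solution_alt genres plays
instance (genres : List String) (plays : List Int) (out : List Int) : Decidable (Spec_solution genres plays out) := by unfold Spec_solution; infer_instance

-- ===== CLAIM (what is proved, stated in full; the proofs are below) =====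
def Claim_equal_solution : Prop := ∀ (genres : List String) (plays : List Int), Dom_solution genres plays → Pre_solution genres plays → Spec_solution genres plays (solution genres plays)

-- ===== LEMMAS AND PROOFS =====

theorem pvFoldlRangeGetD {α β γ : Type} (f : γ → α → β → γ) (da : α) (db : β) :
    ∀ (gs : List α) (ps : List β), gs.length ≤ ps.length → ∀ (init : γ),
      (List.range gs.length).foldl (fun d k => f d (gs.getD k da) (ps.getD k db)) init
        = (gs.zip ps).foldl (fun d q => f d q.1 q.2) init := by
  intro gs
  induction gs with
  | nil => intro ps h init; simp
  | cons g gs ih =>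
    intro ps h init
    cases ps with
    | nil => simp at h
    | cons p ps =>
      simp only [List.length_cons, List.range_succ_eq_map, List.foldl_cons, List.foldl_map,
        List.getD_cons_zero, List.getD_cons_succ, List.zip_cons_cons]
      exact ih ps (by simpa using h) (f init g p)

theorem pvGetDFoldlInsertAdd (l : List (String × Int)) :
    ∀ (d : PySem.Dict String Int) (g : String),
      (l.foldl (fun d q => d.insert q.1 (d.getD q.1 0 + q.2)) d).getD g 0
        = d.getD g 0 + ((l.filter (fun q => q.1 == g)).map (fun q => q.2)).sum := by
  induction l with
  | nil => intro d g; simp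
  | cons q l ih =>
    intro d g
    simp only [List.foldl_cons, List.filter_cons]
    rw [ih]
    by_cases h : q.1 = g
    · simp [h]
      ring
    · simp [h, PySem.Dict.getD_insert, Ne.symm h]

theorem pvFilterSingle (l : List (String × Int)) :
    ∀ (g : String) (j : Nat), (l.map Prod.fst).count g = 1 →
      List.idxOf? g (l.map Prod.fst) = some j →
      l.filter (fun q => q.1 == g) = (l[j]?).toList := by
  induction l with
  | nil => intro g j h hidx; simp at hidx
  | cons q l ih =>
    intro g j hcount hidx
    by_cases hg : q.1 = g
    · have hj0 : j = 0 := by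
        rw [List.map_cons, List.idxOf?_cons, if_pos (by simp [hg])] at hidx
        simpa using hidx.symm
      subst hj0
      have hnot : g ∉ l.map Prod.fst := by
        rw [List.map_cons, List.count_cons] at hcount
        have := List.count_eq_zero.mp (by simp [hg] at hcount; omega)
        exact this
      have hfil : l.filter (fun q => q.1 == g) = [] := by
        rw [List.filter_eq_nil_iff]
        intro q' hq' hbeq
        exact hnot (by
          have : q'.1 = g := by simpa using hbeq
          rw [← this]; exact List.mem_map_of_mem hq')
      simp [hg, hfil]
    · rw [List.map_cons, List.idxOf?_cons, if_neg (by simp [hg])] at hidx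
      cases hidx' : List.idxOf? g (l.map Prod.fst) with
      | none => rw [hidx'] at hidx; simp at hidx
      | some j' =>
        rw [hidx'] at hidx
        simp only [Option.map_some, Option.some_inj] at hidx
        subst hidx
        have hcount' : (l.map Prod.fst).count g = 1 := by
          rw [List.map_cons, List.count_cons] at hcount; simp [hg] at hcount; simpa using hcount
        rw [List.filter_cons_of_neg (by simp [hg]), List.getElem?_cons_succ]
        exact ih g j' hcount' hidx'

theorem pvIdxOfMem {α : Type} [BEq α] [LawfulBEq α] (l : List α) (a : α) (h : a ∈ l) :
    List.idxOf? a l = some (l.idxOf a) := by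
  induction l with
  | nil => simp at h
  | cons b l ih =>
    by_cases hb : b = a
    · simp [List.idxOf?_cons, hb]
    · have ha : a ∈ l := by cases h with | head => exact absurd rfl hb | tail _ h' => exact h'
      simp [List.idxOf?_cons, hb, ih ha]

theorem pvInsertByMap {α β : Type} (bef : α → α → Bool) (bef' : β → β → Bool) (m : α → β)
    (h : ∀ a b, bef' (m a) (m b) = bef a b) (x : α) :
    ∀ ys, (PySem.List.insertBy bef x ys).map m = PySem.List.insertBy bef' (m x) (ys.map m) := by
  intro ys
  induction ys with
  | nil => simp [PySem.List.insertBy]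
  | cons y ys ih =>
    simp only [PySem.List.insertBy, List.map_cons, h x y]
    cases hb : bef x y with
    | true => simp
    | false => simp [ih]

theorem pvSortedRevMap {α β κ : Type} [LinearOrder κ] (l : List α) (m : α → β) (k : α → κ) (k' : β → κ)
    (h : ∀ a, k' (m a) = k a) :
    PySem.List.sorted (l.map m) k' true = (PySem.List.sorted l k true).map m := by
  rw [PySem.List.sorted_rev_eq_foldl_insertBy, PySem.List.sorted_rev_eq_foldl_insertBy, List.foldl_map]
  suffices H : ∀ (acc : List α),
      l.foldl (fun acc x => PySem.List.insertBy (fun a b => decide (k' b < k' a)) (m x) acc) (acc.map m)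
        = (l.foldl (fun acc x => PySem.List.insertBy (fun a b => decide (k b < k a)) x acc) acc).map m by
    simpa using H []
  induction l with
  | nil => intro acc; simp
  | cons z l ih =>
    intro acc
    simp only [List.foldl_cons]
    rw [← pvInsertByMap (fun a b => decide (k b < k a)) (fun a b => decide (k' b < k' a)) m
      (fun a b => by simp [h]) z acc, ih]

theorem pvInsertByFront {α : Type} (bef : α → α → Bool) (x : α) (zs : List α)
    (h : ∀ z ∈ zs, bef x z = true) : PySem.List.insertBy bef x zs = x :: zs := by
  cases zs with
  | nil => simp [PySem.List.insertBy]
  | cons z zs => simp [PySem.List.insertBy, h z (List.mem_cons_self)]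

theorem pvInsertByConsPos {α : Type} (bef : α → α → Bool) (x z : α) (zs : List α)
    (h : bef x z = true) : PySem.List.insertBy bef x (z :: zs) = x :: z :: zs := by
  simp [PySem.List.insertBy, h]

theorem pvInsertByConsNeg {α : Type} (bef : α → α → Bool) (x z : α) (zs : List α)
    (h : bef x z = false) : PySem.List.insertBy bef x (z :: zs) = z :: PySem.List.insertBy bef x zs := by
  simp [PySem.List.insertBy, h]

theorem pvFilterInsertByNeg {α : Type} (bef : α → α → Bool) (p : α → Bool) (x : α) (hx : p x = false) :
    ∀ ys, (PySem.List.insertBy bef x ys).filter p = ys.filter p := by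
  intro ys
  induction ys with
  | nil => simp [PySem.List.insertBy, hx]
  | cons y ys ih =>
    simp only [PySem.List.insertBy]
    cases hb : bef x y with
    | true => simp [List.filter_cons, hx]
    | false => simp [List.filter_cons, ih]

theorem pvFilterInsertByPos {α κ : Type} [LinearOrder κ] (key : α → κ) (p : α → Bool) (x : α)
    (hx : p x = true) :
    ∀ ys : List α, ys.Pairwise (fun a b => key b ≤ key a) →
      (PySem.List.insertBy (fun a b => decide (key b < key a)) x ys).filter p
        = PySem.List.insertBy (fun a b => decide (key b < key a)) x (ys.filter p) := by
  intro ys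
  induction ys with
  | nil => simp [PySem.List.insertBy, hx]
  | cons y ys ih =>
    intro hpw
    rcases List.pairwise_cons.mp hpw with ⟨hy, hpw'⟩
    by_cases hxy : key y < key x
    · rw [pvInsertByConsPos _ _ _ _ (by simp [hxy])]
      by_cases hpy : p y = true
      · rw [List.filter_cons_of_pos hx, List.filter_cons_of_pos hpy]
        exact (pvInsertByConsPos _ _ _ _ (by simp [hxy])).symm
      · have hpy' : p y = false := by simpa using hpy
        rw [List.filter_cons_of_pos hx, List.filter_cons_of_neg (by simp [hpy'])]
        exact (pvInsertByFront _ _ _ (fun z hz => by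
          have hzy := hy z (List.mem_of_mem_filter hz)
          simp [lt_of_le_of_lt hzy hxy])).symm
    · have hdec : (decide (key y < key x)) = false := by simp [hxy]
      rw [pvInsertByConsNeg _ _ _ _ hdec]
      by_cases hpy : p y = true
      · rw [List.filter_cons_of_pos hpy, List.filter_cons_of_pos hpy,
          pvInsertByConsNeg _ _ _ _ hdec, ih hpw']
      · have hpy' : p y = false := by simpa using hpy
        rw [List.filter_cons_of_neg (by simp [hpy']), List.filter_cons_of_neg (by simp [hpy']),
          ih hpw']

theorem pvSortedRevFilter {α κ : Type} [LinearOrder κ] (key : α → κ) (p : α → Bool) (l : List α) :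
    (PySem.List.sorted l key true).filter p = PySem.List.sorted (l.filter p) key true := by
  induction l using List.reverseRecOn with
  | nil => simp [PySem.List.sorted]
  | append_singleton l x ih =>
    rw [PySem.List.sorted_rev_eq_foldl_insertBy, List.foldl_append, List.foldl_cons, List.foldl_nil,
      ← PySem.List.sorted_rev_eq_foldl_insertBy, List.filter_append]
    by_cases hp : p x = true
    · rw [pvFilterInsertByPos key p x hp _ (PySem.List.sorted_pairwise_rev l key), ih,
        List.filter_cons_of_pos hp, List.filter_nil,
        PySem.List.sorted_rev_eq_foldl_insertBy (l.filter p ++ [x]), List.foldl_append,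
        List.foldl_cons, List.foldl_nil, ← PySem.List.sorted_rev_eq_foldl_insertBy]
    · have hp' : p x = false := by simpa using hp
      rw [pvFilterInsertByNeg _ p x hp', ih, List.filter_cons_of_neg (by simp [hp']),
        List.filter_nil, List.append_nil]

def pvCan (genres : List String) (plays : List Int) : String → Int × Int :=
  fun g => (plays.getD (genres.idxOf g) 0, (genres.idxOf g : Int))

def pvDf (genres : List String) : List String :=
  (PySem.Set.ofList genres).filter (fun g => decide (List.count g genres = 1))

def pvCanon (genres : List String) (plays : List Int) : List Int :=
  (PySem.List.sorted ((pvDf genres).map (pvCan genres plays)) (fun pi => pi.1) true).map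
    (fun pi => pi.2)

-- first index / play of a genre with a single occurrence
theorem pvCanSpec (genres : List String) (plays : List Int) (hlen : genres.length ≤ plays.length)
    (g : String) (hg : g ∈ genres) :
    ∃ j : Nat, List.idxOf? g genres = some j ∧ j < genres.length ∧ genres[j]? = some g ∧
      pvCan genres plays g = (plays.getD j 0, (j : Int)) ∧
      (genres.zip plays)[j]? = some (g, plays.getD j 0) := by
  refine ⟨genres.idxOf g, pvIdxOfMem genres g hg, ?_, ?_, rfl, ?_⟩
  · have hsome : PySem.List.index? genres g = some (genres.idxOf g) := by
      rw [PySem.List.index?_eq_idxOf?]; exact pvIdxOfMem genres g hg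
    obtain ⟨hjlt, -, -⟩ := PySem.List.getElem_of_index?_eq_some hsome
    exact hjlt
  · have hsome : PySem.List.index? genres g = some (genres.idxOf g) := by
      rw [PySem.List.index?_eq_idxOf?]; exact pvIdxOfMem genres g hg
    obtain ⟨hjlt, hget, -⟩ := PySem.List.getElem_of_index?_eq_some hsome
    rw [List.getElem?_eq_getElem hjlt, hget]
  · have hsome : PySem.List.index? genres g = some (genres.idxOf g) := by
      rw [PySem.List.index?_eq_idxOf?]; exact pvIdxOfMem genres g hg
    obtain ⟨hjlt, hget, -⟩ := PySem.List.getElem_of_index?_eq_some hsome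
    have hlt' : genres.idxOf g < (genres.zip plays).length := by
      rw [List.length_zip]; omega
    have hltp : genres.idxOf g < plays.length := by omega
    rw [List.getElem?_eq_getElem hlt', List.getElem_zip, hget, List.getD_eq_getElem plays 0 hltp]

theorem pvAeq (genres : List String) (plays : List Int) (hlen : genres.length ≤ plays.length) :
    solution genres plays = pvCanon genres plays := by
  have hmapfst : (genres.zip plays).map Prod.fst = genres := List.map_fst_zip hlen
  simp only [solution, PySem.List.len_eq, PySem.List.pyRange_zero_natCast, List.foldl_map,
    PySem.List.pyGetD_natCast]
  rw [pvFoldlRangeGetD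
    (fun (d : PySem.Dict String Int) g p =>
      if !d.contains g then d.insert g p else d.insert g (d.getD g 0 + p)) "" 0 genres plays hlen]
  have hbody : (fun (d : PySem.Dict String Int) (q : String × Int) =>
        if !d.contains q.1 then d.insert q.1 q.2 else d.insert q.1 (d.getD q.1 0 + q.2))
      = fun d q => d.insert q.1 (d.getD q.1 0 + q.2) := by
    funext d q
    by_cases hc : d.contains q.1 = true
    · simp [hc]
    · have hc' : d.contains q.1 = false := by simpa using hc
      simp [hc', PySem.Dict.getD_of_not_contains _ _ hc']
  rw [show (fun (d : PySem.Dict String Int) (q : String × Int) =>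
      (fun (d : PySem.Dict String Int) g p =>
        if !d.contains g then d.insert g p else d.insert g (d.getD g 0 + p)) d q.1 q.2)
    = fun d q => d.insert q.1 (d.getD q.1 0 + q.2) from hbody]
  -- A's dict: keys and items
  have hnodupA : ((genres.zip plays).foldl
      (fun d q => d.insert q.1 (d.getD q.1 0 + q.2)) PySem.Dict.empty).keys.Nodup := by
    exact PySem.Dict.nodup_keys_foldl_insert_key (genres.zip plays) (fun q => q.1)
      (fun d q => d.getD q.1 0 + q.2) PySem.Dict.empty (by simp)
  have hkeysA : ((genres.zip plays).foldl
      (fun d q => d.insert q.1 (d.getD q.1 0 + q.2)) PySem.Dict.empty).keys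
      = PySem.Set.ofList genres := by
    have h1 := PySem.Dict.keys_foldl_insert_key (genres.zip plays) (fun q => q.1)
      (fun d q => d.getD q.1 0 + q.2) PySem.Dict.empty
    have h2 : (genres.zip plays).map (fun q => q.1) = genres := hmapfst
    rw [h1, h2, PySem.Dict.keys_empty, PySem.Set.update_nil_left]
  have hitemsA : ((genres.zip plays).foldl
      (fun d q => d.insert q.1 (d.getD q.1 0 + q.2)) PySem.Dict.empty).items
      = (PySem.Set.ofList genres).map
          (fun g => (g, (((genres.zip plays).filter (fun q => q.1 == g)).map (fun q => q.2)).sum)) := by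
    rw [PySem.Dict.items_eq_map_keys _ hnodupA 0, hkeysA]
    apply List.map_congr_left
    intro g _
    rw [pvGetDFoldlInsertAdd]
    simp
  rw [hitemsA]
  -- A's output loop: filter + map over the sorted items
  have hloop : (fun (answer : List Int) (it : String × Int) =>
        if PySem.List.count genres it.1 = 1 then
          answer ++ [(((PySem.List.index? genres it.1).getD 0 : Nat) : Int)]
        else answer)
      = (fun answer it =>
          if (fun it : String × Int => decide (List.count it.1 genres = 1)) it = true then
            answer ++ [(fun it : String × Int => (((List.idxOf? it.1 genres).getD 0 : Nat) : Int)) it]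
          else answer) := by
    funext answer it
    simp [PySem.List.count_eq, PySem.List.index?_eq_idxOf?]
  rw [hloop, PySem.List.foldl_append_if, List.nil_append]
  rw [pvSortedRevFilter (fun x : String × Int => x.2)
    (fun it : String × Int => decide (List.count it.1 genres = 1))]
  rw [List.filter_map]
  have hfe : ((fun it : String × Int => decide (List.count it.1 genres = 1)) ∘
      (fun g => (g, (((genres.zip plays).filter (fun q => q.1 == g)).map (fun q => q.2)).sum)))
      = fun g => decide (List.count g genres = 1) := rfl
  rw [hfe]
  rw [pvSortedRevMap (l := (PySem.Set.ofList genres).filter (fun g => decide (List.count g genres = 1)))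
    (m := fun g => (g, (((genres.zip plays).filter (fun q => q.1 == g)).map (fun q => q.2)).sum))
    (k := fun g => (((genres.zip plays).filter (fun q => q.1 == g)).map (fun q => q.2)).sum)
    (k' := fun x : String × Int => x.2) (fun a => rfl)]
  rw [List.map_map]
  -- push the (key, index) pair through the sort
  rw [show ((fun it : String × Int => (((List.idxOf? it.1 genres).getD 0 : Nat) : Int)) ∘
      (fun g => (g, (((genres.zip plays).filter (fun q => q.1 == g)).map (fun q => q.2)).sum)))
      = ((fun pi : Int × Int => pi.2) ∘ (fun g =>
          ((((genres.zip plays).filter (fun q => q.1 == g)).map (fun q => q.2)).sum,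
           (((List.idxOf? g genres).getD 0 : Nat) : Int)))) from rfl]
  rw [← List.map_map, ← pvSortedRevMap
    (l := (PySem.Set.ofList genres).filter (fun g => decide (List.count g genres = 1)))
    (m := fun g => ((((genres.zip plays).filter (fun q => q.1 == g)).map (fun q => q.2)).sum,
                    (((List.idxOf? g genres).getD 0 : Nat) : Int)))
    (k := fun g => (((genres.zip plays).filter (fun q => q.1 == g)).map (fun q => q.2)).sum)
    (k' := fun pi : Int × Int => pi.1) (fun a => rfl)]
  -- on single-occurrence genres the pair is exactly pvCan
  unfold pvCanon pvDf
  congr 1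
  congr 1
  apply List.map_congr_left
  intro g hgmem
  rcases List.mem_filter.mp hgmem with ⟨hgset, hgcnt⟩
  have hg : g ∈ genres := (PySem.Set.mem_ofList genres g).mp hgset
  have hcnt : List.count g genres = 1 := of_decide_eq_true hgcnt
  obtain ⟨j, hidx, hjlt, hjget, hcang, hpj⟩ := pvCanSpec genres plays hlen g hg
  have hfil : (genres.zip plays).filter (fun q => q.1 == g) = [(g, plays.getD j 0)] := by
    have h1 : ((genres.zip plays).map Prod.fst).count g = 1 := by rw [hmapfst]; exact hcnt
    have h2 : List.idxOf? g ((genres.zip plays).map Prod.fst) = some j := by rw [hmapfst]; exact hidx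
    rw [pvFilterSingle (genres.zip plays) g j h1 h2, hpj]
    rfl
  rw [hfil, hidx, hcang]
  simp

-- ===== B-side lemmas =====

-- membership in the fold that builds B's singles set
theorem pvMemFoldlAddIf {β : Type} (cond : β → Bool) (f : β → String) :
    ∀ (l : List β) (s0 : PySem.Set String) (x : String),
      (x ∈ l.foldl (fun s i => if cond i then PySem.Set.add s (f i) else s) s0
        ↔ x ∈ s0 ∨ ∃ i ∈ l, cond i = true ∧ f i = x) := by
  intro l
  induction l with
  | nil => intro s0 x; simp
  | cons b l ih =>
    intro s0 x
    simp only [List.foldl_cons]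
    by_cases hc : cond b = true
    · rw [if_pos hc, ih, PySem.Set.mem_add]
      constructor
      · rintro ((h | h) | ⟨i, hi, hci, hfi⟩)
        · exact Or.inl h
        · exact Or.inr ⟨b, List.mem_cons_self, hc, h.symm⟩
        · exact Or.inr ⟨i, List.mem_cons_of_mem _ hi, hci, hfi⟩
      · rintro (h | ⟨i, hi, hci, hfi⟩)
        · exact Or.inl (Or.inl h)
        · rcases List.mem_cons.mp hi with rfl | hi'
          · exact Or.inl (Or.inr hfi.symm)
          · exact Or.inr ⟨i, hi', hci, hfi⟩
    · rw [if_neg hc, ih]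
      constructor
      · rintro (h | ⟨i, hi, hci, hfi⟩)
        · exact Or.inl h
        · exact Or.inr ⟨i, List.mem_cons_of_mem _ hi, hci, hfi⟩
      · rintro (h | ⟨i, hi, hci, hfi⟩)
        · exact Or.inl h
        · rcases List.mem_cons.mp hi with rfl | hi'
          · exact absurd hci hc
          · exact Or.inr ⟨i, hi', hci, hfi⟩

-- two distinct occurrences give count ≥ 2
theorem pvTwoIdxCount (sg : List String) (x : String) (i j : Nat) (hi : i < sg.length)
    (hj : j < sg.length) (hij : i < j) (h1 : sg[i] = x) (h2 : sg[j] = x) : 2 ≤ sg.count x := by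
  rw [← List.duplicate_iff_two_le_count]
  exact List.duplicate_iff_exists_distinct_get.mpr
    ⟨⟨i, hi⟩, ⟨j, hj⟩, Fin.mk_lt_mk.mpr hij, by simp [h1], by simp [h2]⟩

-- in a sorted list, "differs from both neighbours" characterises count = 1
theorem pvRunSingle (sg : List String) (hs : sg.Pairwise (· ≤ ·)) (x : String) :
    (∃ k, k < sg.length ∧ sg.getD k "" = x ∧
        (k = 0 ∨ sg.getD (k - 1) "" ≠ sg.getD k "") ∧
        (k = sg.length - 1 ∨ sg.getD (k + 1) "" ≠ sg.getD k "")) ↔ sg.count x = 1 := by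
  have hmono : ∀ i j (_ : i < sg.length) (_ : j < sg.length), i < j → sg[i] ≤ sg[j] := by
    intro i j hi hj hij
    exact List.pairwise_iff_getElem.mp hs i j hi hj hij
  constructor
  · rintro ⟨k, hk, hx, h1, h2⟩
    rw [List.getD_eq_getElem sg "" hk] at hx h1 h2
    have huniq : ∀ j (hj : j < sg.length), j ≠ k → sg[j] ≠ x := by
      intro j hj hjk hjx
      rcases Nat.lt_or_ge j k with hlt | hge
      · have hk0 : k ≠ 0 := by omega
        have hk1 : k - 1 < sg.length := by omega
        have hprev : sg[k - 1] ≠ x := by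
          rcases h1 with h | h
          · exact absurd h hk0
          · rw [List.getD_eq_getElem sg "" hk1] at h; rw [hx] at h; exact h
        have hle1 : sg[j] ≤ sg[k - 1] := by
          rcases Nat.eq_or_lt_of_le (Nat.le_sub_one_of_lt hlt) with he | hl
          · exact le_of_eq (by congr 1)
          · exact hmono j (k - 1) hj hk1 hl
        have hle2 : sg[k - 1] ≤ sg[k] := hmono (k - 1) k hk1 hk (by omega)
        exact hprev (le_antisymm (hx ▸ hle2) (hjx ▸ hle1))
      · have hjk' : k < j := by omega
        have hkl : k ≠ sg.length - 1 := by omega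
        have hk1 : k + 1 < sg.length := by omega
        have hnext : sg[k + 1] ≠ x := by
          rcases h2 with h | h
          · exact absurd h hkl
          · rw [List.getD_eq_getElem sg "" hk1] at h; rw [hx] at h; exact h
        have hle1 : sg[k] ≤ sg[k + 1] := hmono k (k + 1) hk hk1 (by omega)
        have hle2 : sg[k + 1] ≤ sg[j] := by
          rcases Nat.eq_or_lt_of_le (Nat.succ_le_of_lt hjk') with he | hl
          · exact le_of_eq (by congr 1)
          · exact hmono (k + 1) j hk1 hj hl
        exact hnext (le_antisymm (hjx ▸ hle2) (hx ▸ hle1))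
    have hmem : x ∈ sg := hx ▸ List.getElem_mem hk
    have h1le : 1 ≤ sg.count x := List.count_pos_iff.mpr hmem
    have h2le : ¬ 2 ≤ sg.count x := by
      intro h2c
      obtain ⟨n, m, hnm, hxn, hxm⟩ := List.duplicate_iff_exists_distinct_get.mp
        (List.duplicate_iff_two_le_count.mpr h2c)
      by_cases hn : (n : Nat) = k
      · have hm : (m : Nat) ≠ k := by omega
        exact huniq m m.isLt hm (by simpa using hxm.symm)
      · exact huniq n n.isLt hn (by simpa using hxn.symm)
    omega
  · intro hc
    have hmem : x ∈ sg := List.count_pos_iff.mp (by omega)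
    obtain ⟨k, hk, hxk⟩ := List.mem_iff_getElem.mp hmem
    refine ⟨k, hk, by rw [List.getD_eq_getElem sg "" hk]; exact hxk, ?_, ?_⟩
    · by_cases hk0 : k = 0
      · exact Or.inl hk0
      · refine Or.inr ?_
        have hk1 : k - 1 < sg.length := by omega
        rw [List.getD_eq_getElem sg "" hk1, List.getD_eq_getElem sg "" hk]
        intro he
        have : 2 ≤ sg.count x :=
          pvTwoIdxCount sg x (k - 1) k hk1 hk (by omega) (he.trans hxk) hxk
        omega
    · by_cases hkl : k = sg.length - 1
      · exact Or.inl hkl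
      · refine Or.inr ?_
        have hk1 : k + 1 < sg.length := by omega
        rw [List.getD_eq_getElem sg "" hk1, List.getD_eq_getElem sg "" hk]
        intro he
        have : 2 ≤ sg.count x :=
          pvTwoIdxCount sg x k (k + 1) hk hk1 (by omega) hxk (he.trans hxk)
        omega

-- filtering the dedup by a count-≤-1 predicate = filtering the list itself
theorem pvFoldlAddFilter (p : String → Bool) :
    ∀ (gs : List String) (acc : PySem.Set String),
      (∀ g, p g = true → gs.count g ≤ 1) →
      (∀ g ∈ acc, p g = true → g ∉ gs) →
      (gs.foldl PySem.Set.add acc).filter p = acc.filter p ++ gs.filter p := by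
  intro gs
  induction gs with
  | nil => intro acc _ _; simp
  | cons g t ih =>
    intro acc hcnt hdisj
    simp only [List.foldl_cons]
    have hcnt' : ∀ g', p g' = true → t.count g' ≤ 1 := by
      intro g' hg'
      have := hcnt g' hg'
      rw [List.count_cons] at this
      omega
    by_cases hg : g ∈ acc
    · rw [PySem.Set.add_of_mem hg]
      have hpg : p g = false := by
        by_cases hp : p g = true
        · exact absurd (List.mem_cons_self) (hdisj g hg hp)
        · simpa using hp
      rw [ih acc hcnt' (fun g' hg' hp' => fun hmem =>
        hdisj g' hg' hp' (List.mem_cons_of_mem _ hmem))]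
      rw [List.filter_cons_of_neg (by simp [hpg])]
    · rw [PySem.Set.add_of_not_mem hg]
      have hdisj' : ∀ g' ∈ acc ++ [g], p g' = true → g' ∉ t := by
        intro g' hg' hp'
        rcases List.mem_append.mp hg' with h | h
        · exact fun hmem => hdisj g' h hp' (List.mem_cons_of_mem _ hmem)
        · have : g' = g := by simpa using h
          subst this
          intro hmem
          have := hcnt g' hp'
          rw [List.count_cons_self] at this
          have : t.count g' = 0 := by omega
          exact (List.count_eq_zero.mp this) hmem
      rw [ih (acc ++ [g]) hcnt' hdisj', List.filter_append, List.filter_cons]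
      by_cases hp : p g = true
      · simp [hp]
      · simp [hp]

theorem pvOfListFilter (p : String → Bool) (gs : List String)
    (hcnt : ∀ g, p g = true → gs.count g ≤ 1) :
    (PySem.Set.ofList gs).filter p = gs.filter p := by
  have h := pvFoldlAddFilter p gs PySem.Set.empty hcnt (by intro g hg; simp [PySem.Set.empty] at hg)
  rw [show PySem.Set.ofList gs = gs.foldl PySem.Set.add PySem.Set.empty from rfl, h]
  simp [PySem.Set.empty]

-- B's pair-collecting pass, for predicates true only on once-occurring genres
theorem pvPairsEnum (p : String → Bool) :
    ∀ (gs : List String) (ps : List Int) (s : Int),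
      gs.length ≤ ps.length → (∀ g, p g = true → gs.count g ≤ 1) →
      ((PySem.List.enumerate (gs.zip ps) s).filter (fun e => p e.2.1)).map (fun e => (e.2.2, e.1))
        = (gs.filter p).map (fun g => (ps.getD (gs.idxOf g) 0, s + (gs.idxOf g : Int))) := by
  intro gs
  induction gs with
  | nil => intro ps s _ _; simp
  | cons g t ih =>
    intro ps s hlen hcnt
    cases ps with
    | nil => simp at hlen
    | cons q r =>
      rw [List.zip_cons_cons, PySem.List.enumerate_cons]
      have hcnt' : ∀ g', p g' = true → t.count g' ≤ 1 := by
        intro g' hg'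
        have := hcnt g' hg'
        rw [List.count_cons] at this
        omega
      have htail := ih r (s + 1) (by simpa using hlen) hcnt'
      have hne : ∀ g' ∈ t.filter p, g' ≠ g := by
        intro g' hg' he
        subst he
        have hp' := List.of_mem_filter hg'
        have := hcnt g' hp'
        rw [List.count_cons_self] at this
        have h0 : t.count g' = 0 := by omega
        exact (List.count_eq_zero.mp h0) (List.mem_of_mem_filter hg')
      have hshift : (t.filter p).map
            (fun g' => ((q :: r).getD ((g :: t).idxOf g') 0, s + ((g :: t).idxOf g' : Int)))
          = (t.filter p).map (fun g' => (r.getD (t.idxOf g') 0, s + 1 + (t.idxOf g' : Int))) := by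
        apply List.map_congr_left
        intro g' hg'
        rw [List.idxOf_cons_ne t (Ne.symm (hne g' hg'))]
        simp only [List.getD_cons_succ]
        rw [Prod.mk.injEq]
        refine ⟨rfl, ?_⟩
        push_cast
        ring
      by_cases hp : p g = true
      · rw [List.filter_cons_of_pos (by simpa using hp), List.map_cons,
          List.filter_cons_of_pos (by simpa using hp), List.map_cons]
        rw [htail, hshift]
        simp [List.idxOf_cons_self]
      · rw [List.filter_cons_of_neg (by simpa using hp),
          List.filter_cons_of_neg (by simpa using hp)]
        rw [htail, hshift]

theorem pvBeq (genres : List String) (plays : List Int) (hlen : genres.length ≤ plays.length) :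
    solution_alt genres plays = pvCanon genres plays := by
  simp only [solution_alt]
  have hperm : (PySem.List.sorted genres (fun g => g) false).Perm genres :=
    PySem.List.sorted_perm genres (fun g => g) false
  have hsort : (PySem.List.sorted genres (fun g => g) false).Pairwise (· ≤ ·) := by
    have := PySem.List.sorted_pairwise genres (fun g => g)
    simpa using this
  have hcount : ∀ x, (PySem.List.sorted genres (fun g => g) false).count x = genres.count x :=
    fun x => hperm.count_eq x
  set sg := PySem.List.sorted genres (fun g => g) false with hsgdef
  -- the singles set contains exactly the genres occurring once
  have hmem : ∀ x : String,
      (x ∈ (PySem.List.pyRange 0 (PySem.List.len sg) 1).foldl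
        (fun s i =>
          if ((i == 0) || !(PySem.List.pyGetD sg (i - 1) "" == PySem.List.pyGetD sg i "")) &&
             ((i == PySem.List.len sg - 1) ||
               !(PySem.List.pyGetD sg (i + 1) "" == PySem.List.pyGetD sg i "")) then
            PySem.Set.add s (PySem.List.pyGetD sg i "")
          else s)
        PySem.Set.empty) ↔ genres.count x = 1 := by
    intro x
    rw [PySem.List.len_eq, PySem.List.pyRange_zero_natCast, List.foldl_map,
      pvMemFoldlAddIf _ _ (List.range sg.length) PySem.Set.empty x]
    rw [← hcount x, ← pvRunSingle sg hsort x]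
    constructor
    · rintro (h | ⟨k, hk, hcond, hfk⟩)
      · simp [PySem.Set.empty] at h
      · have hklt : k < sg.length := List.mem_range.mp hk
        rw [Bool.and_eq_true, Bool.or_eq_true, Bool.or_eq_true] at hcond
        obtain ⟨hl, hr⟩ := hcond
        refine ⟨k, hklt, ?_, ?_, ?_⟩
        · rw [PySem.List.pyGetD_natCast] at hfk; exact hfk
        · by_cases hk0 : k = 0
          · exact Or.inl hk0
          · rcases hl with h0 | hne
            · exact absurd (by exact_mod_cast beq_iff_eq.mp h0) hk0
            · refine Or.inr ?_
              have hc : ((k : Int) - 1) = ((k - 1 : Nat) : Int) := by omega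
              rw [hc, PySem.List.pyGetD_natCast, PySem.List.pyGetD_natCast] at hne
              simpa using hne
        · by_cases hkl : k = sg.length - 1
          · exact Or.inl hkl
          · rcases hr with h0 | hne
            · have h0' : (k : Int) = (sg.length : Int) - 1 := beq_iff_eq.mp h0
              exact absurd (by omega) hkl
            · refine Or.inr ?_
              have hc : ((k : Int) + 1) = ((k + 1 : Nat) : Int) := by omega
              rw [hc, PySem.List.pyGetD_natCast, PySem.List.pyGetD_natCast] at hne
              simpa using hne
    · rintro ⟨k, hklt, hxk, h1, h2⟩
      refine Or.inr ⟨k, List.mem_range.mpr hklt, ?_, by rw [PySem.List.pyGetD_natCast]; exact hxk⟩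
      rw [Bool.and_eq_true, Bool.or_eq_true, Bool.or_eq_true]
      constructor
      · by_cases hk0 : k = 0
        · exact Or.inl (by simp [hk0])
        · rcases h1 with h0 | hne
          · exact absurd h0 hk0
          · refine Or.inr ?_
            have hc : ((k : Int) - 1) = ((k - 1 : Nat) : Int) := by omega
            rw [hc, PySem.List.pyGetD_natCast, PySem.List.pyGetD_natCast]
            simpa using hne
      · by_cases hkl : k = sg.length - 1
        · refine Or.inl ?_
          simp only [beq_iff_eq]
          omega
        · rcases h2 with h0 | hne
          · exact absurd h0 hkl
          · refine Or.inr ?_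
            have hc : ((k : Int) + 1) = ((k + 1 : Nat) : Int) := by omega
            rw [hc, PySem.List.pyGetD_natCast, PySem.List.pyGetD_natCast]
            simpa using hne
  -- replace the membership test by the count-1 predicate
  have hfilter : ((PySem.List.enumerate (genres.zip plays) 0).filter
        (fun e => PySem.Set.contains
          ((PySem.List.pyRange 0 (PySem.List.len sg) 1).foldl
            (fun s i =>
              if ((i == 0) || !(PySem.List.pyGetD sg (i - 1) "" == PySem.List.pyGetD sg i "")) &&
                 ((i == PySem.List.len sg - 1) ||
                   !(PySem.List.pyGetD sg (i + 1) "" == PySem.List.pyGetD sg i "")) then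
                PySem.Set.add s (PySem.List.pyGetD sg i "")
              else s)
            PySem.Set.empty) e.2.1))
      = ((PySem.List.enumerate (genres.zip plays) 0).filter
          (fun e => decide (List.count e.2.1 genres = 1))) := by
    apply List.filter_congr
    intro e _
    simp only [PySem.Set.contains]
    rw [Bool.eq_iff_iff]
    simp only [List.contains_iff_mem, decide_eq_true_eq]
    exact hmem e.2.1
  rw [hfilter]
  have hcnt : ∀ g, (fun g => decide (List.count g genres = 1)) g = true → genres.count g ≤ 1 := by
    intro g hg
    have : List.count g genres = 1 := of_decide_eq_true hg
    omega
  rw [pvPairsEnum (fun g => decide (List.count g genres = 1)) genres plays 0 hlen hcnt]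
  unfold pvCanon pvDf
  rw [pvOfListFilter _ genres hcnt]
  congr 1
  congr 1
  apply List.map_congr_left
  intro g _
  simp [pvCan]

-- ===== VERDICT (by name: the statement is the Claim_ definition above) =====
theorem solution_spec : Claim_equal_solution := by
  intro genres plays _ hpre
  unfold Spec_solution
  unfold Pre_solution at hpre
  rw [pvAeq genres plays hpre]
  exact (pvBeq genres plays hpre).symm
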